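-- pv_equiv track=rewrite | github.com/sominsong/NIMOS | analysis/gsp_nagram.py | make_C
-- ===== SOURCE A (Python) =====
-- def make_C(pre_L):
--     items = set()
--     for seqx in pre_L.keys():
--         for seqy in pre_L.keys():
--             if seqx.split(",")[-1] == seqy.split(",")[0]:
--                 item = seqx + "," + seqy.split(",")[-1]
--                 items.add(item)
--     return items
-- ===== SOURCE B (Python) =====
-- def make_C(pre_L):
--     keys = list(pre_L.keys())
--     index = {}
--     for k in keys:
--         index.setdefault(k.split(",")[0], []).append(k.split(",")[-1])
--     items = set()
--     for seqx in keys: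
--         for last in index.get(seqx.split(",")[-1], []):
--             items.add(seqx + "," + last)
--     return items
-- ===== Notes on version B (the rewrite author's own statement) =====
-- stated objective: faster
-- what changed: Replaces the quadratic all-pairs key scan by a dict indexing keys' first tokens to their last tokens, built once, then a single pass over keys looking up each key's last token.
import Mathlib
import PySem

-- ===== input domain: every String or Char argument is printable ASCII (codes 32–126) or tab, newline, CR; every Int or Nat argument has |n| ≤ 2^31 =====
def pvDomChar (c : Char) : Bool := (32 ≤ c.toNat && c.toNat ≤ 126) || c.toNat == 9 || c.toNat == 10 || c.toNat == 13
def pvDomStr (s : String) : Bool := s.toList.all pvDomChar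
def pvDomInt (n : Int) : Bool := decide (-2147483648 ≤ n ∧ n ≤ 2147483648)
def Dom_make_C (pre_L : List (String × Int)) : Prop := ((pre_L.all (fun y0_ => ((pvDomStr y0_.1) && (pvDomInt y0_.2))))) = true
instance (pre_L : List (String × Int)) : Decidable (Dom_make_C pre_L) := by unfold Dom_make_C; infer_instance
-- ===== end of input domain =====

-- B replaces A's quadratic all-pairs key scan by a first-token index (dict) built once,
-- then one lookup pass per key: asymptotically faster, same resulting set in the same order.


-- ===== PORT A =====
-- s.split(",")[0] / s.split(",")[-1]; split with a nonempty separator always returns a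
-- nonempty list, so the getD defaults never fire (exact).
def firstTok (s : String) : String :=
  (PySem.List.pyGet? ((PySem.Str.split? s ",").getD []) 0).getD ""

def lastTok (s : String) : String :=
  (PySem.List.pyGet? ((PySem.Str.split? s ",").getD []) (-1)).getD ""

-- pre_L.keys(): the dict's keys, i.e. the distinct first components in first-occurrence order
def make_C (pre_L : List (String × Int)) : List String :=
  let keys := PySem.List.dedup (pre_L.map Prod.fst)
  keys.foldl (fun items seqx =>
    keys.foldl (fun items seqy =>
      if lastTok seqx == firstTok seqy then
        PySem.Set.add items (seqx ++ "," ++ lastTok seqy)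
      else items) items) PySem.Set.empty

-- ===== PORT B =====
def make_C_alt (pre_L : List (String × Int)) : List String :=
  let keys := PySem.List.dedup (pre_L.map Prod.fst)
  -- index.setdefault(k.split(",")[0], []).append(k.split(",")[-1])
  let index := keys.foldl
    (fun d k => PySem.Dict.modify d (firstTok k) [] (fun v => v ++ [lastTok k]))
    PySem.Dict.empty
  keys.foldl (fun items seqx =>
    (PySem.Dict.getD index (lastTok seqx) []).foldl (fun items lt =>
      PySem.Set.add items (seqx ++ "," ++ lt)) items) PySem.Set.empty

-- ===== PRECONDITION & SPEC =====
def Spec_make_C (pre_L : List (String × Int)) (out : List String) : Prop := out = make_C_alt pre_L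
instance (pre_L : List (String × Int)) (out : List String) : Decidable (Spec_make_C pre_L out) := by unfold Spec_make_C; infer_instance

-- ===== CLAIM (what is proved, stated in full; the proofs are below) =====
def Claim_equal_make_C : Prop := ∀ (pre_L : List (String × Int)), Dom_make_C pre_L → Spec_make_C pre_L (make_C pre_L)

-- ===== LEMMAS AND PROOFS =====

-- B's index maps a token t to the last tokens of the keys whose first token is t, in key order.
lemma bucket_eq (keys : List String) (t : String) :
    PySem.Dict.getD
      (keys.foldl
        (fun d k => PySem.Dict.modify d (firstTok k) [] (fun v => v ++ [lastTok k]))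
        PySem.Dict.empty) t []
    = (keys.filter (fun k => firstTok k == t)).map lastTok := by
  have h := PySem.Dict.getD_foldl_modify_append
    (l := keys.map (fun k => (firstTok k, lastTok k))) (d := PySem.Dict.empty) (c := t)
  simp [List.foldl_map, List.filter_map] at h
  simpa [List.map_map, Function.comp] using h

-- A's inner loop over all keys equals a fold over the matching bucket.
lemma inner_eq (seqx : String) (keys : List String) (items : List String) :
    keys.foldl (fun items seqy =>
      if lastTok seqx == firstTok seqy then
        PySem.Set.add items (seqx ++ "," ++ lastTok seqy)
      else items) items
    = ((keys.filter (fun k => firstTok k == lastTok seqx)).map lastTok).foldl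
        (fun items lt => PySem.Set.add items (seqx ++ "," ++ lt)) items := by
  induction keys generalizing items with
  | nil => rfl
  | cons k ks ih =>
    rw [List.foldl_cons, List.filter_cons]
    by_cases h : firstTok k = lastTok seqx
    · rw [if_pos (by simp [h] : (firstTok k == lastTok seqx) = true), List.map_cons,
        List.foldl_cons, if_pos (by simp [h] : (lastTok seqx == firstTok k) = true)]
      exact ih _
    · rw [if_neg (by simp [h] : ¬ (firstTok k == lastTok seqx) = true),
        if_neg (by simp only [beq_iff_eq]; exact fun e => h e.symm : ¬ (lastTok seqx == firstTok k) = true)]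
      exact ih _

-- ===== VERDICT (by name: the statement is the Claim_ definition above) =====
theorem make_C_spec : Claim_equal_make_C := by
  intro pre_L _
  unfold Spec_make_C make_C make_C_alt
  have hfun :
      (fun (items : List String) (seqx : String) =>
        (PySem.List.dedup (pre_L.map Prod.fst)).foldl (fun items seqy =>
          if lastTok seqx == firstTok seqy then
            PySem.Set.add items (seqx ++ "," ++ lastTok seqy)
          else items) items)
      = (fun (items : List String) (seqx : String) =>
        (PySem.Dict.getD
          ((PySem.List.dedup (pre_L.map Prod.fst)).foldl
            (fun d k => PySem.Dict.modify d (firstTok k) [] (fun v => v ++ [lastTok k]))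
            PySem.Dict.empty) (lastTok seqx) []).foldl
          (fun items lt => PySem.Set.add items (seqx ++ "," ++ lt)) items) := by
    funext items seqx
    rw [bucket_eq, inner_eq]
  simp only [hfun]
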